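-- pv_equiv track=rewrite | github.com/cr-trojan23/project3006 | crypto.py | func
-- ===== SOURCE A (Python) =====
-- def func(st):
--     n=len(st)
--     s=""
--     #y=7*(x**4)+6*(x**2)+3*(x**3)+121*x+1231--equation
--     for i in range(n):
--         x=ord(st[i])
--         y=7*(x**4)+6*(x**2)+3*(x**3)+121*x+1231
--         b=y%128
--         s+=chr(b)
--     return s
-- ===== SOURCE B (Python) =====
-- _TABLE = [chr((7 * r**4 + 3 * r**3 + 6 * r**2 + 121 * r + 1231) % 128) for r in range(128)]
--
-- def func(st):
--     return ''.join(_TABLE[ord(c) % 128] for c in st)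
-- ===== Notes on version B (the rewrite author's own statement) =====
-- stated objective: idiomatic
-- what changed: B precomputes a 128-entry lookup table once (the polynomial mod 128 depends only on ord(c) mod 128) and maps each character through it with a single join, instead of evaluating the polynomial inline for every character.
import Mathlib
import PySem

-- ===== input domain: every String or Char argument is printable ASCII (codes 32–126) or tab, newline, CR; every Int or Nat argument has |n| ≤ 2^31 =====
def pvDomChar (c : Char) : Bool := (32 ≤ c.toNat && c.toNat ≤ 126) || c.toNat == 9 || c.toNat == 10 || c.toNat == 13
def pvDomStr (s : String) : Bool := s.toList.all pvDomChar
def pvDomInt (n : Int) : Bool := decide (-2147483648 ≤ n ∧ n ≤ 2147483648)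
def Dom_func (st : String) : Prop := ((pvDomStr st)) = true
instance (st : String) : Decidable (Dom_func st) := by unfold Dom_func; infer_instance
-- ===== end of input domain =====

-- B replaces the per-character inline polynomial with a precomputed 128-entry lookup table (idiomatic; same cost).

-- ===== PORT A =====
def func (st : String) : String :=
  let n : Int := PySem.Str.len st
  String.mk ((PySem.List.pyRange 0 n 1).foldl (fun s i =>
      let x : Int := (PySem.List.pyGetD st.toList i ' ').toNat
      let y : Int := 7 * (x ^ 4) + 6 * (x ^ 2) + 3 * (x ^ 3) + 121 * x + 1231
      let b : Int := PySem.Int.mod y 128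
      s ++ [Char.ofNat b.toNat]) ([] : List Char))

-- ===== PORT B =====
def pvTable : List Char :=
  (PySem.List.pyRange 0 128 1).map (fun r =>
    Char.ofNat (PySem.Int.mod (7 * r ^ 4 + 3 * r ^ 3 + 6 * r ^ 2 + 121 * r + 1231) 128).toNat)

def func_alt (st : String) : String :=
  String.mk (st.toList.map (fun c =>
    PySem.List.pyGetD pvTable (PySem.Int.mod (c.toNat : Int) 128) ' '))

-- ===== PRECONDITION & SPEC =====
def Spec_func (st : String) (out : String) : Prop := out = func_alt st
instance (st : String) (out : String) : Decidable (Spec_func st out) := by unfold Spec_func; infer_instance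

-- ===== CLAIM (what is proved, stated in full; the proofs are below) =====
def Claim_equal_func : Prop := ∀ (st : String), Dom_func st → Spec_func st (func st)

-- ===== LEMMAS AND PROOFS =====

theorem pvTable_get (i : Int) (h0 : 0 ≤ i) (h1 : i < 128) :
    PySem.List.pyGetD pvTable i ' ' =
      Char.ofNat (PySem.Int.mod (7 * i ^ 4 + 3 * i ^ 3 + 6 * i ^ 2 + 121 * i + 1231) 128).toNat := by
  unfold pvTable
  rw [PySem.List.pyGetD_map_pyRange_of_nonneg _ _ _ _ h0 h1]

theorem pv_char_eq (c : Char) (hc : pvDomChar c = true) :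
    Char.ofNat (PySem.Int.mod
        (7 * ((c.toNat : Int) ^ 4) + 6 * ((c.toNat : Int) ^ 2) + 3 * ((c.toNat : Int) ^ 3)
          + 121 * (c.toNat : Int) + 1231) 128).toNat
      = PySem.List.pyGetD pvTable (PySem.Int.mod (c.toNat : Int) 128) ' ' := by
  have hlt : c.toNat < 128 := by
    simp [pvDomChar] at hc
    omega
  have hmod : PySem.Int.mod (c.toNat : Int) 128 = (c.toNat : Int) := by
    rw [PySem.Int.mod_eq_emod_of_pos (by omega)]
    omega
  rw [hmod, pvTable_get _ (by positivity) (by exact_mod_cast hlt)]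
  ring_nf

theorem func_spec' (st : String) (h : Dom_func st) : func st = func_alt st := by
  unfold func func_alt
  simp only [PySem.Str.len_eq]
  rw [PySem.List.foldl_pyRange_zero_pyGetD' st.toList ' '
      (fun (s : List Char) (c : Char) =>
        s ++ [Char.ofNat (PySem.Int.mod
          (7 * ((c.toNat : Int) ^ 4) + 6 * ((c.toNat : Int) ^ 2) + 3 * ((c.toNat : Int) ^ 3)
            + 121 * (c.toNat : Int) + 1231) 128).toNat]) []]
  rw [PySem.List.foldl_append_singleton_eq_map]
  congr 1
  apply List.map_congr_left
  intro c hcmem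
  have hc : pvDomChar c = true := by
    have := h
    unfold Dom_func pvDomStr at this
    exact List.all_eq_true.mp this c hcmem
  exact pv_char_eq c hc

-- ===== VERDICT (by name: the statement is the Claim_ definition above) =====
theorem func_spec : Claim_equal_func := by
  intro st h
  unfold Spec_func
  exact func_spec' st h
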